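-- pv_equiv track=rewrite | github.com/EnforcerXII/DAA-Assignment | Question2.py | element_search
-- ===== SOURCE A (Python) =====
-- def element_search(arr, i):
--
--     if i < 0:
--         return -1
--     else:
--         if arr[i] == 2 * i:
--             return arr[i]
--         else:
--             return element_search(arr, i - 1)
-- ===== SOURCE B (Python) =====
-- def element_search(arr, i):
--     for j in range(i, -1, -1):
--         if arr[j] == 2 * j:
--             return arr[j]
--     return -1
-- ===== Notes on version B (the rewrite author's own statement) =====
-- stated objective: simpler
-- what changed: Replaced the tail recursion by an iterative downward for-loop over range(i, -1, -1) with early return, same scan order and return value.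
import Mathlib
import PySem

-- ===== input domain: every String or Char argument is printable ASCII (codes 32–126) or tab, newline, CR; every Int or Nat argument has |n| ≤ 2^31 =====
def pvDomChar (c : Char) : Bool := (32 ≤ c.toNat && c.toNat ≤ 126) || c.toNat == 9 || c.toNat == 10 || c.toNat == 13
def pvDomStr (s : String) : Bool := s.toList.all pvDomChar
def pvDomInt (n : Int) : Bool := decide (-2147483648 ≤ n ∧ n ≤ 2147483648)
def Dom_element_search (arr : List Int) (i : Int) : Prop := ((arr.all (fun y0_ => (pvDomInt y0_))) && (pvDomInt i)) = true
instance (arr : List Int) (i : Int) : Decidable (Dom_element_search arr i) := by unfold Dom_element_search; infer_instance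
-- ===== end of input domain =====

-- B replaces A's tail recursion by an iterative downward scan (range(i,-1,-1) with early return); same values, simpler control flow.

-- ===== PORT A =====
-- A recurses from i downward; arr[i] out of range raises IndexError (excluded by Pre_; 'none => 0' is never reached under Pre_).
def element_search (arr : List Int) (i : Int) : Int :=
  if i < 0 then -1
  else
    match PySem.List.pyGet? arr i with
    | none => 0
    | some v => if v = 2 * i then v else element_search arr (i - 1)
termination_by (i + 1).toNat
decreasing_by simp at *; omega

-- ===== PORT B =====
-- loop 'for j in range(i,-1,-1)' with early return = findSome? over the countdown range; IndexError (unreached under Pre_) modelled 'some 0'.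
def element_search_alt (arr : List Int) (i : Int) : Int :=
  match (PySem.List.pyRange i (-1) (-1)).findSome? (fun j =>
      match PySem.List.pyGet? arr j with
      | none => some 0
      | some v => if v = 2 * j then some v else none) with
  | some r => r
  | none => -1

-- ===== PRECONDITION & SPEC =====
-- Pre_ excludes i ≥ len(arr), where both Pythons raise IndexError on the first access arr[i].
def Pre_element_search (arr : List Int) (i : Int) : Prop := i < (arr.length : Int)
instance (arr : List Int) (i : Int) : Decidable (Pre_element_search arr i) := by unfold Pre_element_search; infer_instance
def pvWitness_element_search : List Int × Int := ([3, 2], 1)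

def Spec_element_search (arr : List Int) (i : Int) (out : Int) : Prop := out = element_search_alt arr i
instance (arr : List Int) (i : Int) (out : Int) : Decidable (Spec_element_search arr i out) := by unfold Spec_element_search; infer_instance

-- ===== CLAIM (what is proved, stated in full; the proofs are below) =====
def Claim_equal_element_search : Prop := ∀ (arr : List Int) (i : Int), Dom_element_search arr i → Pre_element_search arr i → Spec_element_search arr i (element_search arr i)

-- ===== LEMMAS AND PROOFS =====

-- one step of B's scan, matching A's recursion shape
theorem alt_step (arr : List Int) (i : Int) (h : 0 ≤ i) :
    element_search_alt arr i =
      match PySem.List.pyGet? arr i with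
      | none => 0
      | some v => if v = 2 * i then v else element_search_alt arr (i - 1) := by
  unfold element_search_alt
  rw [PySem.List.pyRange_neg_one_cons (by omega : (-1 : Int) < i)]
  simp only [List.findSome?_cons]
  cases hg : PySem.List.pyGet? arr i with
  | none => simp
  | some v =>
    by_cases hv : v = 2 * i
    · simp [hv]
    · simp [hv]

theorem alt_neg (arr : List Int) (i : Int) (h : i < 0) : element_search_alt arr i = -1 := by
  unfold element_search_alt
  rw [PySem.List.pyRange_neg_one_eq_nil (by omega : i ≤ -1)]
  simp

theorem agree (arr : List Int) (i : Int) : element_search arr i = element_search_alt arr i := by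
  rw [element_search]
  by_cases h : i < 0
  · simp [h, alt_neg arr i h]
  · rw [alt_step arr i (by omega)]
    simp only [if_neg h]
    cases hg : PySem.List.pyGet? arr i with
    | none => rfl
    | some v =>
      by_cases hv : v = 2 * i
      · simp [hv]
      · simp only [if_neg hv]
        exact agree arr (i - 1)
termination_by (i + 1).toNat
decreasing_by simp at *; omega

-- ===== VERDICT (by name: the statement is the Claim_ definition above) =====
theorem element_search_spec : Claim_equal_element_search := by
  intro arr i _ _
  exact (agree arr i).symm ▸ rfl
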